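-- pv_equiv track=rewrite | github.com/jpcca/marketing-mix-modelling | src/hill_mixture_mmm/benchmark.py | _merge_statuses
-- ===== SOURCE A (Python) =====
-- from collections.abc import Callable, Sequence
--
-- PASS_WARN_FAIL_ORDER = {"NotApplicable": -1, "Pass": 0, "Warn": 1, "Fail": 2}
--
-- def _merge_statuses(statuses: Sequence[str]) -> str:
--     """Return the most severe Pass/Warn/Fail status."""
--     normalized = [
--         status
--         for status in statuses
--         if status in PASS_WARN_FAIL_ORDER and status != "NotApplicable"
--     ]
--     if not normalized:
--         return "NotApplicable"
--     return max(normalized, key=lambda status: PASS_WARN_FAIL_ORDER[status])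
-- ===== SOURCE B (Python) =====
-- def _merge_statuses(statuses):
--     """Return the most severe Pass/Warn/Fail status."""
--     for status in ("Fail", "Warn", "Pass"):
--         if status in statuses:
--             return status
--     return "NotApplicable"
-- ===== Notes on version B (the rewrite author's own statement) =====
-- stated objective: idiomatic
-- what changed: Replaces the filtered-list-plus-max-by-severity-rank construction with short-circuit membership checks in descending severity order, keeping no intermediate list or key lambda.
import Mathlib
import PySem

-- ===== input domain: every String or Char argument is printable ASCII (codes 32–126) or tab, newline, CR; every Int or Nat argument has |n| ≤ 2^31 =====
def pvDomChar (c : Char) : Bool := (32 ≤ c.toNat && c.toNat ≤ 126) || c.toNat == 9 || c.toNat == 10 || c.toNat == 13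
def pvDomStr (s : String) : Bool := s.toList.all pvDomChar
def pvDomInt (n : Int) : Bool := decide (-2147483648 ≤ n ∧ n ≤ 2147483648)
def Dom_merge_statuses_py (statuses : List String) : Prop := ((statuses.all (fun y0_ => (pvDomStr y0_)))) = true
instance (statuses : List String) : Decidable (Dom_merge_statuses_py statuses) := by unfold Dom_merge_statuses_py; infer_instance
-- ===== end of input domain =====

-- B replaces A's filtered-list + max-by-severity-rank with short-circuit membership checks in descending severity order (idiomatic; same O(n) cost).


-- ===== PORT A =====
-- PASS_WARN_FAIL_ORDER = {"NotApplicable": -1, "Pass": 0, "Warn": 1, "Fail": 2}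
def passWarnFailOrder : PySem.Dict String Int :=
  PySem.Dict.ofList [("NotApplicable", -1), ("Pass", 0), ("Warn", 1), ("Fail", 2)]

def merge_statuses_py (statuses : List String) : String :=
  let normalized := statuses.filter
    (fun status => (PySem.Dict.get? passWarnFailOrder status).isSome && status != "NotApplicable")
  -- 'if not normalized: return "NotApplicable"' then max(normalized, key=…); max? is none exactly on []
  match PySem.List.max? normalized (fun status => PySem.Dict.getD passWarnFailOrder status 0) with
  | none => "NotApplicable"
  | some m => m

-- ===== PORT B =====
def merge_statuses_py_alt (statuses : List String) : String :=
  if statuses.contains "Fail" then "Fail"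
  else if statuses.contains "Warn" then "Warn"
  else if statuses.contains "Pass" then "Pass"
  else "NotApplicable"

-- ===== PRECONDITION & SPEC =====
def Spec_merge_statuses_py (statuses : List String) (out : String) : Prop := out = merge_statuses_py_alt statuses
instance (statuses : List String) (out : String) : Decidable (Spec_merge_statuses_py statuses out) := by unfold Spec_merge_statuses_py; infer_instance

-- ===== CLAIM (what is proved, stated in full; the proofs are below) =====
def Claim_equal_merge_statuses_py : Prop := ∀ (statuses : List String), Dom_merge_statuses_py statuses → Spec_merge_statuses_py statuses (merge_statuses_py statuses)

-- ===== LEMMAS AND PROOFS =====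

-- membership in A's normalized list = membership in statuses with one of the three live statuses
theorem mem_normalized (statuses : List String) (s : String) :
    s ∈ statuses.filter
      (fun status => (PySem.Dict.get? passWarnFailOrder status).isSome && status != "NotApplicable")
      ↔ s ∈ statuses ∧ (s = "Pass" ∨ s = "Warn" ∨ s = "Fail") := by
  simp only [List.mem_filter, Bool.and_eq_true, bne_iff_ne]
  constructor
  · rintro ⟨hmem, hsome, hne⟩
    refine ⟨hmem, ?_⟩
    by_cases h1 : s = "Pass"; · exact Or.inl h1
    by_cases h2 : s = "Warn"; · exact Or.inr (Or.inl h2)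
    by_cases h3 : s = "Fail"; · exact Or.inr (Or.inr h3)
    exfalso
    rw [show passWarnFailOrder =
        PySem.Dict.mk [("NotApplicable", -1), ("Pass", 0), ("Warn", 1), ("Fail", 2)] from rfl] at hsome
    simp only [PySem.Dict.get?_mk_cons, beq_iff_eq] at hsome
    simp [Ne.symm hne, Ne.symm h1, Ne.symm h2, Ne.symm h3, PySem.Dict.get?] at hsome
  · rintro ⟨hmem, h⟩
    rcases h with h | h | h <;> subst h <;> exact ⟨hmem, by decide, by decide⟩

theorem key_of_mem (s : String) (h : s = "Pass" ∨ s = "Warn" ∨ s = "Fail") :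
    PySem.Dict.getD passWarnFailOrder s 0 = (if s = "Fail" then 2 else if s = "Warn" then 1 else 0) := by
  rcases h with h | h | h <;> subst h <;> decide

-- ===== VERDICT (by name: the statement is the Claim_ definition above) =====
theorem merge_statuses_py_spec : Claim_equal_merge_statuses_py := by
  intro statuses _
  unfold Spec_merge_statuses_py merge_statuses_py merge_statuses_py_alt
  simp only [List.contains_eq_mem, decide_eq_true_eq]
  by_cases hF : "Fail" ∈ statuses
  · have hFm := (mem_normalized statuses "Fail").2 ⟨hF, by simp⟩
    cases hmax : PySem.List.max? (statuses.filter
        (fun status => (PySem.Dict.get? passWarnFailOrder status).isSome && status != "NotApplicable"))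
        (fun status => PySem.Dict.getD passWarnFailOrder status 0) with
    | none => exact absurd ((PySem.List.max?_eq_none_iff _ _).1 hmax ▸ hFm) (List.not_mem_nil)
    | some m =>
      have hle := PySem.List.max?_isMax hmax _ hFm
      have hm3 := ((mem_normalized statuses m).1 (PySem.List.max?_mem hmax)).2
      have hkm := key_of_mem m hm3
      simp only at hle
      rw [hkm, show PySem.Dict.getD passWarnFailOrder "Fail" 0 = 2 from by decide] at hle
      simp only [hF, if_pos]
      split_ifs at hle with h1 <;> [exact h1; omega; omega]
  · by_cases hW : "Warn" ∈ statuses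
    · have hWm := (mem_normalized statuses "Warn").2 ⟨hW, by simp⟩
      cases hmax : PySem.List.max? (statuses.filter
          (fun status => (PySem.Dict.get? passWarnFailOrder status).isSome && status != "NotApplicable"))
          (fun status => PySem.Dict.getD passWarnFailOrder status 0) with
      | none => exact absurd ((PySem.List.max?_eq_none_iff _ _).1 hmax ▸ hWm) (List.not_mem_nil)
      | some m =>
        have hle := PySem.List.max?_isMax hmax _ hWm
        have hm := (mem_normalized statuses m).1 (PySem.List.max?_mem hmax)
        have hkm := key_of_mem m hm.2
        have hmF : m ≠ "Fail" := fun h => hF (h ▸ hm.1)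
        simp only at hle
        rw [hkm, show PySem.Dict.getD passWarnFailOrder "Warn" 0 = 1 from by decide,
          if_neg hmF] at hle
        simp only [hF, hW, if_neg, if_pos, not_false_iff]
        split_ifs at hle with h1 <;> [exact h1; omega]
    · by_cases hP : "Pass" ∈ statuses
      · have hPm := (mem_normalized statuses "Pass").2 ⟨hP, by simp⟩
        cases hmax : PySem.List.max? (statuses.filter
            (fun status => (PySem.Dict.get? passWarnFailOrder status).isSome && status != "NotApplicable"))
            (fun status => PySem.Dict.getD passWarnFailOrder status 0) with
        | none => exact absurd ((PySem.List.max?_eq_none_iff _ _).1 hmax ▸ hPm) (List.not_mem_nil)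
        | some m =>
          have hm := (mem_normalized statuses m).1 (PySem.List.max?_mem hmax)
          have hmP : m = "Pass" := by
            rcases hm.2 with h | h | h
            · exact h
            · exact absurd (h ▸ hm.1) hW
            · exact absurd (h ▸ hm.1) hF
          simp [hF, hW, hP, hmP]
      · have hnil : statuses.filter
            (fun status => (PySem.Dict.get? passWarnFailOrder status).isSome && status != "NotApplicable") = [] := by
          rw [List.eq_nil_iff_forall_not_mem]
          intro s hs
          rcases ((mem_normalized statuses s).1 hs) with ⟨hmem, h | h | h⟩ <;> subst h
          · exact hP hmem
          · exact hW hmem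
          · exact hF hmem
        rw [hnil]
        simp [hF, hW, hP, PySem.List.max?]
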